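-- pv_equiv track=rewrite | github.com/glowfi/DS | Programs/python/4_Binary_Search/17_Minimum_Number_of_Days_to_Make_m_Bouquets.py | canMakeBouquet
-- ===== SOURCE A (Python) =====
-- from typing import List
-- from typing import List
--
-- def canMakeBouquet(bloomDay: List[int], currDay: int, m: int, k: int) -> bool:
--     tmp = k
--     c = 0
--
--     for i in range(len(bloomDay)):
--         if tmp == 0:
--             c += 1
--             tmp = k
--
--         if bloomDay[i] > currDay:
--             tmp = k
--
--         if bloomDay[i] <= currDay:
--             tmp -= 1
--
--     if tmp == 0:
--         c += 1
--
--     return c >= m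
-- ===== SOURCE B (Python) =====
-- def canMakeBouquet(bloomDay, currDay, m, k):
--     # Staged: collect barrier positions (unbloomed flowers, with sentinels -1 and n),
--     # then the bouquet count is pure index arithmetic over adjacent barrier pairs.
--     n = len(bloomDay)
--     barriers = [-1] + [i for i, d in enumerate(bloomDay) if d > currDay] + [n]
--     total = sum((b - a - 1) // k for a, b in zip(barriers, barriers[1:]))
--     return total >= m
-- ===== Notes on version B (the rewrite author's own statement) =====
-- stated objective: alternative
-- what changed: Replaces A's single-pass countdown state machine (tmp counter decremented/reset with a deferred bouquet increment) by staged passes: first collect the positions of unbloomed flowers as barriers (with sentinels -1 and n), then obtain the bouquet count by index arithmetic (b-a-1)//k over adjacent barrier pairs.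
-- outside the precondition, e.g. on canMakeBouquet([1], 1, 1, 0): A returns True, B raises ZeroDivisionError; on canMakeBouquet([1, 1], 1, 0, -1): A returns True, B returns False
import Mathlib
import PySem

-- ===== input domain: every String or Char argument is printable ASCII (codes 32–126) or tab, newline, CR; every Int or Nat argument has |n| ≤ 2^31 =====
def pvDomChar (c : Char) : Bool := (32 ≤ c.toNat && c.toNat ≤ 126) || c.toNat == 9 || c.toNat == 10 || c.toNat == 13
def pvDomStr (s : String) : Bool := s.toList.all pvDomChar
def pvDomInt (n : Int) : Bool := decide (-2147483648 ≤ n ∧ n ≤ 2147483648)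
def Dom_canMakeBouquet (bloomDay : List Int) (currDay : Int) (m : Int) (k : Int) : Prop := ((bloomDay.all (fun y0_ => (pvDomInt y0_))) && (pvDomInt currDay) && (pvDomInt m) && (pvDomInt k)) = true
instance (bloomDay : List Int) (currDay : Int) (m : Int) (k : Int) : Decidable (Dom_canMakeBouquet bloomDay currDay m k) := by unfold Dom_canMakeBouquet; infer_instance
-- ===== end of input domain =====

-- B replaces A's single-pass countdown state machine by staged passes: collect barrier
-- positions (unbloomed flowers, with sentinels -1 and n), then count bouquets by index
-- arithmetic (b-a-1)//k over adjacent barrier pairs; same O(n) cost, different decomposition.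

-- ===== PORT A =====
-- loop body of A: the three sequential ifs on the state (tmp, c), given the element bloomDay[i]
def canMakeBouquetStepA (currDay k : Int) (s : Int × Int) (d : Int) : Int × Int :=
  let s1 := if s.1 = 0 then (k, s.2 + 1) else s
  let t1 := if d > currDay then k else s1.1
  let t2 := if d ≤ currDay then t1 - 1 else t1
  (t2, s1.2)

def canMakeBouquet (bloomDay : List Int) (currDay : Int) (m : Int) (k : Int) : Bool :=
  -- for i in range(len(bloomDay)): bloomDay[i] is always in range, so pyGetD with default 0 is exact
  let st := (PySem.List.pyRange 0 (bloomDay.length : Int) 1).foldl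
    (fun s i => canMakeBouquetStepA currDay k s (PySem.List.pyGetD bloomDay i 0)) (k, (0 : Int))
  decide ((if st.1 = 0 then st.2 + 1 else st.2) ≥ m)

-- ===== PORT B =====
def canMakeBouquet_alt (bloomDay : List Int) (currDay : Int) (m : Int) (k : Int) : Bool :=
  let n : Int := bloomDay.length
  -- barriers = [-1] + [i for i, d in enumerate(bloomDay) if d > currDay] + [n]
  let barriers : List Int :=
    [-1] ++ ((PySem.List.enumerate bloomDay 0).filter (fun p => decide (p.2 > currDay))).map (fun p => p.1) ++ [n]
  -- total = sum((b - a - 1) // k for a, b in zip(barriers, barriers[1:]))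
  let total : Int :=
    ((barriers.zip (barriers.drop 1)).map (fun ab => PySem.Int.floordiv (ab.2 - ab.1 - 1) k)).sum
  decide (total ≥ m)

-- ===== PRECONDITION & SPEC =====
-- Pre_ excludes k ≤ 0, outside the problem's natural domain (a bouquet size must be positive):
-- at k = 0 B's (b-a-1) // k raises ZeroDivisionError, and for negative k A's countdown counter
-- can never reach 0, an accidental behaviour B does not reproduce.
def Pre_canMakeBouquet (bloomDay : List Int) (currDay : Int) (m : Int) (k : Int) : Prop := 1 ≤ k
instance (bloomDay : List Int) (currDay : Int) (m : Int) (k : Int) : Decidable (Pre_canMakeBouquet bloomDay currDay m k) := by unfold Pre_canMakeBouquet; infer_instance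
def pvWitness_canMakeBouquet : List Int × Int × Int × Int := ([1, 2], 1, 1, 1)

def Spec_canMakeBouquet (bloomDay : List Int) (currDay : Int) (m : Int) (k : Int) (out : Bool) : Prop := out = canMakeBouquet_alt bloomDay currDay m k
instance (bloomDay : List Int) (currDay : Int) (m : Int) (k : Int) (out : Bool) : Decidable (Spec_canMakeBouquet bloomDay currDay m k out) := by unfold Spec_canMakeBouquet; infer_instance

-- ===== CLAIM (what is proved, stated in full; the proofs are below) =====
def Claim_equal_canMakeBouquet : Prop := ∀ (bloomDay : List Int) (currDay : Int) (m : Int) (k : Int), Dom_canMakeBouquet bloomDay currDay m k → Pre_canMakeBouquet bloomDay currDay m k → Spec_canMakeBouquet bloomDay currDay m k (canMakeBouquet bloomDay currDay m k)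

-- ===== LEMMAS AND PROOFS =====

-- Proof-only intermediate: the run-length state machine (total, run), bridging A's countdown
-- states and B's barrier arithmetic.
def canMakeBouquetStepB (currDay k : Int) (s : Int × Int) (d : Int) : Int × Int :=
  if d ≤ currDay then (s.1, s.2 + 1) else (s.1 + PySem.Int.floordiv s.2 k, 0)

-- Proof-only: sum of (b - a - 1) // k over adjacent pairs, recursively
def canMakeBouquetPairSum (k : Int) : List Int → Int
  | x :: y :: rest => PySem.Int.floordiv (y - x - 1) k + canMakeBouquetPairSum k (y :: rest)
  | _ => 0

-- Proof-only: segment spec; g l p a = bouquets from l starting at position p, last barrier at a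
def canMakeBouquetSeg (currDay k : Int) : List Int → Int → Int → Int
  | [], p, a => PySem.Int.floordiv (p - a - 1) k
  | d :: t, p, a =>
      if d > currDay then PySem.Int.floordiv (p - a - 1) k + canMakeBouquetSeg currDay k t (p + 1) p
      else canMakeBouquetSeg currDay k t (p + 1) a

lemma canMakeBouquet_zip_pairSum (k : Int) (xs : List Int) :
    ((xs.zip (xs.drop 1)).map (fun ab => PySem.Int.floordiv (ab.2 - ab.1 - 1) k)).sum
      = canMakeBouquetPairSum k xs := by
  induction xs with
  | nil => simp [canMakeBouquetPairSum]
  | cons x t ih =>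
      cases t with
      | nil => simp [canMakeBouquetPairSum]
      | cons y r =>
          simp only [List.drop_succ_cons, List.drop_zero, List.zip_cons_cons, List.map_cons,
            List.sum_cons, canMakeBouquetPairSum]
          rw [← ih]
          simp

lemma canMakeBouquet_pairSum_seg (currDay k : Int) (l : List Int) :
    ∀ (p a : Int),
      canMakeBouquetPairSum k
          (a :: (((PySem.List.enumerate l p).filter (fun q => decide (q.2 > currDay))).map (fun q => q.1)
            ++ [p + (l.length : Int)]))
        = canMakeBouquetSeg currDay k l p a := by
  induction l with
  | nil => intro p a; simp [PySem.List.enumerate_nil, canMakeBouquetPairSum, canMakeBouquetSeg]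
  | cons d t ih =>
      intro p a
      rw [PySem.List.enumerate_cons]
      have hlen : p + ((d :: t).length : Int) = (p + 1) + (t.length : Int) := by
        push_cast [List.length_cons]; ring
      rw [hlen]
      by_cases hd : d > currDay
      · simp only [List.filter_cons, hd, decide_true, if_true, List.map_cons, List.cons_append,
          canMakeBouquetSeg, if_pos hd]
        rw [show canMakeBouquetPairSum k (a :: p ::
            (((PySem.List.enumerate t (p + 1)).filter (fun q => decide (q.2 > currDay))).map
              (fun q => q.1) ++ [(p + 1) + (t.length : Int)]))
          = PySem.Int.floordiv (p - a - 1) k + canMakeBouquetPairSum k (p ::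
            (((PySem.List.enumerate t (p + 1)).filter (fun q => decide (q.2 > currDay))).map
              (fun q => q.1) ++ [(p + 1) + (t.length : Int)])) from rfl]
        rw [ih (p + 1) p]
      · simp only [List.filter_cons, hd, decide_false, Bool.false_eq_true, if_false,
          canMakeBouquetSeg, if_neg hd]
        rw [ih (p + 1) a]

lemma canMakeBouquet_seg_fold (currDay k : Int) (l : List Int) :
    ∀ (tot run p a : Int), run = p - a - 1 →
      (l.foldl (canMakeBouquetStepB currDay k) (tot, run)).1
        + PySem.Int.floordiv (l.foldl (canMakeBouquetStepB currDay k) (tot, run)).2 k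
      = tot + canMakeBouquetSeg currDay k l p a := by
  induction l with
  | nil => intro tot run p a h; simp [canMakeBouquetSeg, h]
  | cons d t ih =>
      intro tot run p a h
      by_cases hd : d ≤ currDay
      · have hB : canMakeBouquetStepB currDay k (tot, run) d = (tot, run + 1) := by
          simp [canMakeBouquetStepB, hd]
        simp only [List.foldl_cons, hB, canMakeBouquetSeg, if_neg (not_lt.mpr hd)]
        exact ih tot (run + 1) (p + 1) a (by omega)
      · have hB : canMakeBouquetStepB currDay k (tot, run) d = (tot + PySem.Int.floordiv run k, 0) := by
          simp [canMakeBouquetStepB, hd]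
        simp only [List.foldl_cons, hB, canMakeBouquetSeg, if_pos (lt_of_not_ge hd)]
        rw [ih (tot + PySem.Int.floordiv run k) 0 (p + 1) p (by omega), h]
        ring

-- Simulation relation: A's state (a.1 = tmp, a.2 = c) against the run machine's (b.1 = total, b.2 = run).
-- A defers the bouquet increment: when the trailing run length is a positive multiple of k,
-- tmp = 0 and c is one behind total + run / k; otherwise tmp = k - run % k and c is exact.
def canMakeBouquetRel (k : Int) (a b : Int × Int) : Prop :=
  0 ≤ b.2 ∧
    ((a.1 = 0 ∧ 0 < b.2 ∧ b.2 % k = 0 ∧ a.2 + 1 = b.1 + b.2 / k) ∨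
     (a.1 = k - b.2 % k ∧ ¬(0 < b.2 ∧ b.2 % k = 0) ∧ a.2 = b.1 + b.2 / k))

-- incrementing a nonnegative run: how % k and / k evolve
lemma canMakeBouquet_succ_mod (k r : Int) (hk : 1 ≤ k) (hr : 0 ≤ r) :
    (r % k + 1 = k → (r + 1) % k = 0 ∧ (r + 1) / k = r / k + 1) ∧
    (r % k + 1 ≠ k → (r + 1) % k = r % k + 1 ∧ (r + 1) / k = r / k) := by
  have hk0 : k ≠ 0 := by omega
  have hmod : k * (r / k) + r % k = r := Int.mul_ediv_add_emod r k
  have hlt : r % k < k := Int.emod_lt_of_pos r (by omega)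
  have hge : 0 ≤ r % k := Int.emod_nonneg r hk0
  constructor
  · intro h
    have hr1 : r + 1 = k * (r / k + 1) := by ring_nf; omega
    refine ⟨by rw [hr1]; exact Int.mul_emod_right k _, by rw [hr1, Int.mul_ediv_cancel_left _ hk0]⟩
  · intro h
    have hr1 : r + 1 = (r % k + 1) + k * (r / k) := by omega
    have hlt1 : r % k + 1 < k := by omega
    refine ⟨?_, ?_⟩
    · rw [hr1, Int.add_mul_emod_self_left, Int.emod_eq_of_lt (by omega) hlt1]
    · rw [hr1, Int.add_mul_ediv_left _ _ hk0, Int.ediv_eq_zero_of_lt (by omega) hlt1, zero_add]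

lemma canMakeBouquet_step_rel (currDay k d : Int) (hk : 1 ≤ k) (a b : Int × Int)
    (h : canMakeBouquetRel k a b) :
    canMakeBouquetRel k (canMakeBouquetStepA currDay k a d) (canMakeBouquetStepB currDay k b d) := by
  obtain ⟨hr, hcase⟩ := h
  have hk0 : k ≠ 0 := by omega
  have hlt : b.2 % k < k := Int.emod_lt_of_pos b.2 (by omega)
  have hge : 0 ≤ b.2 % k := Int.emod_nonneg b.2 hk0
  by_cases hd : d ≤ currDay <;> by_cases h0 : a.1 = 0
  · -- bloomed, tmp = 0: deferred increment fires, then tmp = k - 1; run extends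
    have hA : canMakeBouquetStepA currDay k a d = (k - 1, a.2 + 1) := by
      simp [canMakeBouquetStepA, h0, hd, not_lt.mpr hd]
    have hB : canMakeBouquetStepB currDay k b d = (b.1, b.2 + 1) := by
      simp [canMakeBouquetStepB, hd]
    rw [hA, hB]; unfold canMakeBouquetRel; dsimp only
    have hsucc := canMakeBouquet_succ_mod k b.2 hk hr
    rcases hcase with ⟨_, hpos, hm0, hc⟩ | ⟨ht, hnm, hc⟩
    · by_cases h1 : b.2 % k + 1 = k   -- holds iff k = 1 here, since b.2 % k = 0
      · obtain ⟨hm, hdiv⟩ := hsucc.1 h1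
        exact ⟨by omega, Or.inl ⟨by omega, by omega, hm, by omega⟩⟩
      · obtain ⟨hm, hdiv⟩ := hsucc.2 h1
        exact ⟨by omega, Or.inr ⟨by omega, by omega, by omega⟩⟩
    · exact absurd h0 (by omega)   -- second disjunct has tmp = k - b.2 % k ≥ 1
  · -- bloomed, tmp ≠ 0: plain decrement; run extends
    have hA : canMakeBouquetStepA currDay k a d = (a.1 - 1, a.2) := by
      simp [canMakeBouquetStepA, h0, hd, not_lt.mpr hd]
    have hB : canMakeBouquetStepB currDay k b d = (b.1, b.2 + 1) := by
      simp [canMakeBouquetStepB, hd]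
    rw [hA, hB]; unfold canMakeBouquetRel; dsimp only
    have hsucc := canMakeBouquet_succ_mod k b.2 hk hr
    rcases hcase with ⟨ht, _, _, _⟩ | ⟨ht, hnm, hc⟩
    · exact absurd ht h0
    · by_cases h1 : b.2 % k + 1 = k
      · obtain ⟨hm, hdiv⟩ := hsucc.1 h1
        exact ⟨by omega, Or.inl ⟨by omega, by omega, hm, by omega⟩⟩
      · obtain ⟨hm, hdiv⟩ := hsucc.2 h1
        exact ⟨by omega, Or.inr ⟨by omega, by omega, by omega⟩⟩
  · -- not bloomed, tmp = 0: deferred increment fires, tmp reset to k; run // k banked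
    have hA : canMakeBouquetStepA currDay k a d = (k, a.2 + 1) := by
      simp [canMakeBouquetStepA, h0, hd, lt_of_not_ge hd]
    have hB : canMakeBouquetStepB currDay k b d = (b.1 + b.2 / k, 0) := by
      simp [canMakeBouquetStepB, hd, PySem.Int.floordiv_eq_ediv_of_pos (by omega : (0:Int) < k)]
    rw [hA, hB]; unfold canMakeBouquetRel; dsimp only
    rcases hcase with ⟨_, _, _, hc⟩ | ⟨ht, _, _⟩
    · exact ⟨le_refl 0, Or.inr ⟨by simp, by omega, by simp; omega⟩⟩
    · exact absurd h0 (by omega)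
  · -- not bloomed, tmp ≠ 0: tmp reset to k, c unchanged; run // k banked
    have hA : canMakeBouquetStepA currDay k a d = (k, a.2) := by
      simp [canMakeBouquetStepA, h0, hd, lt_of_not_ge hd]
    have hB : canMakeBouquetStepB currDay k b d = (b.1 + b.2 / k, 0) := by
      simp [canMakeBouquetStepB, hd, PySem.Int.floordiv_eq_ediv_of_pos (by omega : (0:Int) < k)]
    rw [hA, hB]; unfold canMakeBouquetRel; dsimp only
    rcases hcase with ⟨ht, _, _, _⟩ | ⟨_, _, hc⟩
    · exact absurd ht h0
    · exact ⟨le_refl 0, Or.inr ⟨by simp, by omega, by simp; omega⟩⟩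

lemma canMakeBouquet_fold_rel (currDay k : Int) (hk : 1 ≤ k) :
    ∀ (l : List Int) (a b : Int × Int), canMakeBouquetRel k a b →
      canMakeBouquetRel k (l.foldl (fun s d => canMakeBouquetStepA currDay k s d) a)
        (l.foldl (canMakeBouquetStepB currDay k) b) := by
  intro l
  induction l with
  | nil => intro a b h; exact h
  | cons d t ih =>
      intro a b h
      exact ih _ _ (canMakeBouquet_step_rel currDay k d hk a b h)

-- ===== VERDICT (by name: the statement is the Claim_ definition above) =====
theorem canMakeBouquet_spec : Claim_equal_canMakeBouquet := by
  intro bloomDay currDay m k _ hk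
  have hk1 : (1 : Int) ≤ k := hk
  unfold Spec_canMakeBouquet
  simp only [canMakeBouquet, canMakeBouquet_alt]
  rw [canMakeBouquet_zip_pairSum]
  have hbar := canMakeBouquet_pairSum_seg currDay k bloomDay 0 (-1)
  rw [zero_add] at hbar
  rw [show ((-1 : Int) :: (((PySem.List.enumerate bloomDay 0).filter
        (fun q => decide (q.2 > currDay))).map (fun q => q.1) ++ [(bloomDay.length : Int)]))
      = [(-1 : Int)] ++ ((PySem.List.enumerate bloomDay 0).filter
        (fun p => decide (p.2 > currDay))).map (fun p => p.1) ++ [(bloomDay.length : Int)] by simp]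
    at hbar
  rw [hbar]
  have hfold := canMakeBouquet_seg_fold currDay k bloomDay 0 0 0 (-1) (by omega)
  rw [zero_add] at hfold
  rw [← hfold]
  rw [PySem.List.foldl_pyRange_zero_pyGetD' bloomDay 0
    (fun s d => canMakeBouquetStepA currDay k s d) ((k : Int), (0 : Int))]
  have hinit : canMakeBouquetRel k ((k : Int), (0 : Int)) ((0 : Int), (0 : Int)) := by
    exact ⟨le_refl 0, Or.inr ⟨by simp, by omega, by simp⟩⟩
  have hrel := canMakeBouquet_fold_rel currDay k hk1 bloomDay _ _ hinit
  set sa := bloomDay.foldl (fun s d => canMakeBouquetStepA currDay k s d) ((k : Int), (0 : Int)) with hsa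
  set sb := bloomDay.foldl (canMakeBouquetStepB currDay k) ((0 : Int), (0 : Int)) with hsb
  obtain ⟨hr, hcase⟩ := hrel
  have hlt : sb.2 % k < k := Int.emod_lt_of_pos sb.2 (by omega)
  have hge : 0 ≤ sb.2 % k := Int.emod_nonneg sb.2 (by omega)
  rw [PySem.Int.floordiv_eq_ediv_of_pos (by omega : (0:Int) < k)]
  rcases hcase with ⟨h0, _, _, hc⟩ | ⟨ht, _, hc⟩
  · rw [if_pos h0, hc]
  · rw [if_neg (by omega : ¬ sa.1 = 0), hc]
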